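-- pv_equiv track=rewrite | github.com/MyBlackHole/python_learn | requests_learn/h5微博点赞/like.py | mid_to_id
-- ===== SOURCE A (Python) =====
-- import math
--
-- __ALPHABET = "0123456789abcdefghijklmnopqrstuvwxyzABCDEFGHIJKLMNOPQRSTUVWXYZ"
--
-- def base62_decode(string, alphabet=__ALPHABET):
--     """Decode a Base X encoded string into the number
--
--     Arguments:
--     - `string`: The encoded string
--     - `alphabet`: The alphabet to use for encoding
--     """
--     base = len(alphabet)
--     strlen = len(string)
--     num = 0
--
--     idx = 0
--     for char in string:
--         power = (strlen - (idx + 1))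
--         num += alphabet.index(char) * (base ** power)
--         idx += 1
--
--     return num
--
-- def mid_to_id(mid):
--     mid = str(mid)[::-1]
--     if len(mid) % 4 == 0:
--         size = len(mid) / 4
--     else:
--         size = len(mid) / 4 + 1
--     size = math.floor(size)
--     result = []
--     for i in range(size):
--         s = mid[i * 4: (i + 1) * 4][::-1]
--         s = str(base62_decode(str(s)))
--         s_len = len(s)
--         if i < size - 1 and s_len < 7:
--             s = (7 - s_len) * '0' + s
--         result.append(s)
--     result.reverse()
--     return int(''.join(result))
-- ===== SOURCE B (Python) =====
-- def _digit(c):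
--     # value of a base-62 digit from its character code (no alphabet table)
--     o = ord(c)
--     if o < 58:
--         return o - 48          # '0'..'9' -> 0..9
--     if o >= 97:
--         return o - 87          # 'a'..'z' -> 10..35
--     return o - 29              # 'A'..'Z' -> 36..61
--
-- def _val(s):
--     v = 0
--     for c in s:
--         v = v * 62 + _digit(c)
--     return v
--
-- def _render(s):
--     if len(s) <= 4:
--         return str(_val(s))
--     return _render(s[:-4]) + str(_val(s[-4:])).zfill(7)
--
-- def mid_to_id(mid):
--     return int(_render(str(mid)))
-- ===== Notes on version B (the rewrite author's own statement) =====
-- stated objective: simpler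
-- what changed: B replaces A's reverse-the-string / range(size) loop / per-chunk re-reversal / alphabet.index with base**power / list append + reverse + join pipeline by a direct recursion that peels the last 4 characters (render(s[:-4]) + zfill of the last chunk), computes each digit's value arithmetically from its character code with no alphabet table, and folds chunks by Horner's rule.
-- outside the precondition, e.g. on mid_to_id(''): A raises ValueError, B returns 0; on mid_to_id('a!'): A raises ValueError, B returns 605
import Mathlib
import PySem

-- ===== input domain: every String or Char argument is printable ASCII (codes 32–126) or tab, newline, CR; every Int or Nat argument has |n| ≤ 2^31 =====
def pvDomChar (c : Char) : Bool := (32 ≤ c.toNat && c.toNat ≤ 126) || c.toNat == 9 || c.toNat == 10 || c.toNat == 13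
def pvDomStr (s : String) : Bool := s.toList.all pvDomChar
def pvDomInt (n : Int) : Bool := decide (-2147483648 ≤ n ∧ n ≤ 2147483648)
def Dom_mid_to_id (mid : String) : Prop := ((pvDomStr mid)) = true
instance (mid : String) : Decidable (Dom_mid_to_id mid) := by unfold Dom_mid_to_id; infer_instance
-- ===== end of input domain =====

-- B replaces A's reverse/loop/list/alphabet.index pipeline by a direct recursion peeling the
-- last 4-character chunk, with digit values computed arithmetically from character codes;
-- objective: simpler (same asymptotic cost).

-- ===== PORT A =====
-- __ALPHABET
def pvAlphabet : List Char := "0123456789abcdefghijklmnopqrstuvwxyzABCDEFGHIJKLMNOPQRSTUVWXYZ".toList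

-- base62_decode: running idx, num += alphabet.index(char) * base ** power.
-- alphabet.index raises ValueError on a char outside the alphabet (excluded by Pre_); here `.getD 0`.
-- power = strlen - (idx + 1) is ≥ 0 throughout the loop (idx < strlen), so Nat subtraction is exact.
def base62_decode (s : List Char) : Int :=
  let strlen := s.length
  (s.foldl (fun (st : Int × Nat) ch =>
      (st.1 + (((PySem.List.index? pvAlphabet ch).getD 0 : Nat) : Int) * (62 : Int) ^ (strlen - (st.2 + 1)),
       st.2 + 1))
    ((0 : Int), (0 : Nat))).1

-- mid_to_id: str(mid)[::-1] is the reversed char list (PySem.List.slice?_none_none_neg_one);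
-- size = math.floor(len/4 [+ 1]) — the float division is exact here and equals the integer arithmetic below;
-- int(''.join(result)) raises ValueError for mid = '' (excluded by Pre_); here `.getD 0`.
def mid_to_id (mid : String) : Int :=
  let m : List Char := mid.toList.reverse
  let n := m.length
  let size : Nat := if n % 4 = 0 then n / 4 else n / 4 + 1
  let result : List (List Char) :=
    (PySem.List.pyRange 0 (size : Int) 1).foldl (fun res i =>
      let s := (PySem.List.slice m (some (i * 4)) (some ((i + 1) * 4))).reverse
      let s := PySem.Int.toChars (base62_decode s)
      let s := if i < (size : Int) - 1 ∧ s.length < 7 then List.replicate (7 - s.length) '0' ++ s else s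
      res ++ [s]) []
  (PySem.Int.ofChars? (PySem.Chars.join [] result.reverse)).getD 0

-- ===== PORT B =====
-- _digit: ord-arithmetic digit value (branches in source order; `o` is the code point)
def pvDigitV (c : Char) : Int :=
  if (c.toNat : Int) < 58 then (c.toNat : Int) - 48
  else if 97 ≤ (c.toNat : Int) then (c.toNat : Int) - 87
  else (c.toNat : Int) - 29

-- _val: Horner fold v = v*62 + _digit(c)
def pvVal (s : List Char) : Int := s.foldl (fun v c => v * 62 + pvDigitV c) 0

-- _render: recursion peeling the last 4 chars; s[:-4] = take (len-4), s[-4:] = drop (len-4)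
-- (exact since len(s) > 4 in that branch)
def pvRender (s : List Char) : List Char :=
  if s.length ≤ 4 then PySem.Int.toChars (pvVal s)
  else pvRender (s.take (s.length - 4)) ++
       PySem.Chars.zfill (PySem.Int.toChars (pvVal (s.drop (s.length - 4)))) 7
termination_by s.length
decreasing_by simp [List.length_take]; omega

-- mid_to_id (B): int(_render(str(mid))); int('') cannot occur here (_render is never empty),
-- and a non-digit result char cannot occur either, but the port keeps the `.getD 0` total form.
def mid_to_id_alt (mid : String) : Int := (PySem.Int.ofChars? (pvRender mid.toList)).getD 0

-- ===== PRECONDITION & SPEC =====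
-- Pre_ excludes exactly the inputs where Python A raises: the empty string (int('') → ValueError)
-- and strings with a character outside the base-62 alphabet (alphabet.index → ValueError).
def Pre_mid_to_id (mid : String) : Prop :=
  mid.toList ≠ [] ∧ mid.toList.all (fun c => pvAlphabet.contains c) = true
instance (mid : String) : Decidable (Pre_mid_to_id mid) := by unfold Pre_mid_to_id; infer_instance
def pvWitness_mid_to_id : String := "4FGhy1"

def Spec_mid_to_id (mid : String) (out : Int) : Prop := out = mid_to_id_alt mid
instance (mid : String) (out : Int) : Decidable (Spec_mid_to_id mid out) := by unfold Spec_mid_to_id; infer_instance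

-- ===== CLAIM (what is proved, stated in full; the proofs are below) =====
def Claim_equal_mid_to_id : Prop := ∀ (mid : String), Dom_mid_to_id mid → Pre_mid_to_id mid → Spec_mid_to_id mid (mid_to_id mid)

-- ===== LEMMAS AND PROOFS =====

-- canonical forms of A's pieces
def pvSizeN (n : Nat) : Nat := if n % 4 = 0 then n / 4 else n / 4 + 1

def pvDecode62 (s : List Char) : Int :=
  s.foldl (fun num ch => num * 62 + (((PySem.List.index? pvAlphabet ch).getD 0 : Nat) : Int)) 0

def pvChunkA (m : List Char) (size i : Nat) : List Char :=
  let s := PySem.Int.toChars (pvDecode62 (((m.drop (4 * i)).take 4).reverse))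
  if (i : Int) < (size : Int) - 1 ∧ s.length < 7 then List.replicate (7 - s.length) '0' ++ s else s

theorem pvHornerAcc (s : List Char) (a : Int) :
    s.foldl (fun num ch => num * 62 + (((PySem.List.index? pvAlphabet ch).getD 0 : Nat) : Int)) a
      = a * 62 ^ s.length + pvDecode62 s := by
  induction s generalizing a with
  | nil => simp [pvDecode62]
  | cons c t ih =>
    simp only [List.foldl_cons, List.length_cons]
    rw [ih]
    have hd : pvDecode62 (c :: t) =
        (((PySem.List.index? pvAlphabet c).getD 0 : Nat) : Int) * 62 ^ t.length + pvDecode62 t := by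
      rw [pvDecode62, List.foldl_cons, ih]; ring
    rw [hd]; ring

theorem pvDecNonneg (s : List Char) : 0 ≤ pvDecode62 s := by
  suffices h : ∀ a : Int, 0 ≤ a →
      0 ≤ s.foldl (fun num ch => num * 62 + (((PySem.List.index? pvAlphabet ch).getD 0 : Nat) : Int)) a from
    h 0 le_rfl
  induction s with
  | nil => intro a ha; simpa using ha
  | cons c t ih =>
    intro a ha
    simp only [List.foldl_cons]
    exact ih _ (by positivity)

theorem pvDecAux (t : List Char) (L : Nat) (a : Int) (j : Nat) (h : j + t.length ≤ L) :
    (t.foldl (fun (st : Int × Nat) ch =>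
      (st.1 + (((PySem.List.index? pvAlphabet ch).getD 0 : Nat) : Int) * (62 : Int) ^ (L - (st.2 + 1)),
       st.2 + 1)) (a, j)).1
      = a + pvDecode62 t * 62 ^ (L - (j + t.length)) := by
  induction t generalizing a j with
  | nil => simp [pvDecode62]
  | cons c t ih =>
    simp only [List.foldl_cons, List.length_cons]
    rw [ih _ (j+1) (by simp at h ⊢; omega)]
    have hd : pvDecode62 (c :: t) =
        (((PySem.List.index? pvAlphabet c).getD 0 : Nat) : Int) * 62 ^ t.length + pvDecode62 t := by
      rw [pvDecode62, List.foldl_cons, pvHornerAcc]; ring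
    rw [hd]
    have hp : (62:Int) ^ t.length * 62 ^ (L - (j + 1 + t.length)) = 62 ^ (L - (j+1)) := by
      rw [← pow_add]; congr 1; simp at h; omega
    have : L - (j + (t.length + 1)) = L - (j + 1 + t.length) := by omega
    rw [this, ← hp]; ring

theorem pvDecEq (s : List Char) : base62_decode s = pvDecode62 s := by
  rw [base62_decode]
  rw [pvDecAux s s.length 0 0 (by omega)]
  simp

theorem pvDigitsHeadAux (fuel n : Nat) (acc : List Char)
    (h : ∃ d rest, acc = Nat.digitChar (d % 10) :: rest) :
    ∃ d rest, Nat.toDigitsCore 10 fuel n acc = Nat.digitChar (d % 10) :: rest := by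
  induction fuel generalizing n acc with
  | zero => simpa [Nat.toDigitsCore] using h
  | succ f ih =>
    rw [Nat.toDigitsCore]
    split
    · exact ⟨n, _, rfl⟩
    · exact ih _ _ ⟨n, _, rfl⟩

theorem pvDigitsHead (m : Nat) : ∃ d rest, Nat.toDigits 10 m = Nat.digitChar (d % 10) :: rest := by
  rw [Nat.toDigits, Nat.toDigitsCore]
  split
  · exact ⟨m, _, rfl⟩
  · exact pvDigitsHeadAux _ _ _ ⟨m, _, rfl⟩

theorem pvDigitCharNotSign (d : Nat) : ¬(Nat.digitChar (d % 10) = '+' ∨ Nat.digitChar (d % 10) = '-') := by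
  have h : d % 10 < 10 := Nat.mod_lt _ (by norm_num)
  set k := d % 10 with hk
  interval_cases k <;> decide

theorem pvPadEqZfill (mval : Int) (hm : 0 ≤ mval) :
    (if (PySem.Int.toChars mval).length < 7
      then List.replicate (7 - (PySem.Int.toChars mval).length) '0' ++ PySem.Int.toChars mval
      else PySem.Int.toChars mval) = PySem.Chars.zfill (PySem.Int.toChars mval) 7 := by
  have hcs : PySem.Int.toChars mval = Nat.toDigits 10 mval.toNat := by
    rw [PySem.Int.toChars]; rw [if_neg (by omega)]
  obtain ⟨d, rest, hdr⟩ := pvDigitsHead mval.toNat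
  rw [hcs, hdr]
  rw [PySem.Chars.zfill]
  by_cases hlen : (Nat.digitChar (d % 10) :: rest).length < 7
  · rw [if_pos hlen, if_neg (by simp only [List.length_cons] at hlen ⊢; push_cast; omega)]
    rw [if_neg (pvDigitCharNotSign d)]
    congr 1
  · rw [if_neg hlen, if_pos (by simp only [List.length_cons, not_lt] at hlen ⊢; push_cast; omega)]

theorem pvPortAEq (mid : String) :
    mid_to_id mid =
      (PySem.Int.ofChars? (PySem.Chars.join []
        (((List.range (pvSizeN mid.toList.length)).map
            (pvChunkA mid.toList.reverse (pvSizeN mid.toList.length))).reverse))).getD 0 := by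
  rw [mid_to_id]
  simp only [PySem.List.foldl_append_singleton_eq_map, List.nil_append]
  have hsize : (if mid.toList.reverse.length % 4 = 0 then mid.toList.reverse.length / 4
      else mid.toList.reverse.length / 4 + 1) = pvSizeN mid.toList.length := by
    rw [pvSizeN, List.length_reverse]
  rw [hsize, PySem.List.pyRange_zero_natCast, List.map_map]
  congr 2
  congr 1
  congr 1
  apply List.map_congr_left
  intro i _
  simp only [Function.comp_apply]
  have h1 : ((i : Int) * 4) = ((4 * i : Nat) : Int) := by push_cast; ring
  have h2 : ((i : Int) + 1) * 4 = ((4 * i : Nat) : Int) + ((4 : Nat) : Int) := by push_cast; ring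
  rw [h1, h2, PySem.List.slice_natCast_add, pvDecEq, pvChunkA]

-- digit values: on alphabet characters the index lookup equals the ord arithmetic
theorem pvDigitAll :
    pvAlphabet.all (fun c =>
      decide ((((PySem.List.index? pvAlphabet c).getD 0 : Nat) : Int) = pvDigitV c)) = true := by
  decide

theorem pvDigitEq (c : Char) (hc : c ∈ pvAlphabet) :
    (((PySem.List.index? pvAlphabet c).getD 0 : Nat) : Int) = pvDigitV c := by
  have := List.all_eq_true.mp pvDigitAll c hc
  exact of_decide_eq_true this

theorem pvValEq (s : List Char) (h : ∀ c ∈ s, c ∈ pvAlphabet) : pvDecode62 s = pvVal s := by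
  rw [pvDecode62, pvVal]
  exact PySem.List.foldl_congr_mem s _ _ 0 (fun acc x hx => by rw [pvDigitEq x (h x hx)])

theorem pvJoinNilFlatten (ps : List (List Char)) : PySem.Chars.join [] ps = ps.flatten := by
  induction ps with
  | nil => simp [PySem.Chars.join_nil]
  | cons p rest ih =>
    cases rest with
    | nil => simp [PySem.Chars.join_singleton]
    | cons q t => rw [PySem.Chars.join_cons_cons] at *; simp_all

-- main induction: A's joined chunk list equals B's recursive render
theorem pvMainAux : ∀ (n : Nat) (l : List Char), l.length = n → l ≠ [] → (∀ c ∈ l, c ∈ pvAlphabet) →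
    PySem.Chars.join [] (((List.range (pvSizeN l.length)).map (pvChunkA l.reverse (pvSizeN l.length))).reverse)
      = pvRender l := by
  intro n
  induction n using Nat.strong_induction_on with
  | _ n ih =>
  intro l hn hl hmem
  have hn1 : 1 ≤ l.length := List.length_pos_of_ne_nil hl
  by_cases hsmall : l.length ≤ 4
  · have hS : pvSizeN l.length = 1 := by rw [pvSizeN]; split_ifs <;> omega
    rw [hS, pvRender, if_pos hsmall]
    simp only [List.range_one, List.map_cons, List.map_nil, List.reverse_cons, List.reverse_nil,
      List.nil_append, PySem.Chars.join_singleton]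
    simp only [pvChunkA]
    have htake : l.reverse.take 4 = l.reverse := List.take_of_length_le (by simp; omega)
    simp only [Nat.mul_zero, List.drop_zero, htake, List.reverse_reverse]
    rw [if_neg (by rintro ⟨h, -⟩; norm_num at h), pvValEq l hmem]
  · have h5 : 5 ≤ l.length := by omega
    have hl' : (l.take (l.length - 4)).length = l.length - 4 := by
      rw [List.length_take]; omega
    have hne' : l.take (l.length - 4) ≠ [] := by
      intro h; have := congrArg List.length h; rw [hl'] at this; simp at this; omega
    have hmem' : ∀ c ∈ l.take (l.length - 4), c ∈ pvAlphabet :=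
      fun c hc => hmem c (List.mem_of_mem_take hc)
    have hS : pvSizeN l.length = pvSizeN (l.length - 4) + 1 := by
      rw [pvSizeN, pvSizeN]; split_ifs <;> omega
    have hS1 : 1 ≤ pvSizeN (l.length - 4) := by rw [pvSizeN]; split_ifs <;> omega
    have hIH := ih (l.length - 4) (by omega) (l.take (l.length - 4)) hl' hne' hmem'
    rw [hl'] at hIH
    rw [hS, List.range_succ_eq_map, List.map_cons, List.map_map, List.reverse_cons]
    rw [pvJoinNilFlatten, List.flatten_append] at *
    have htail : (List.range (pvSizeN (l.length - 4))).map
          (pvChunkA l.reverse (pvSizeN (l.length - 4) + 1) ∘ Nat.succ)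
        = (List.range (pvSizeN (l.length - 4))).map
          (pvChunkA (l.take (l.length - 4)).reverse (pvSizeN (l.length - 4))) := by
      apply List.map_congr_left
      intro i _
      simp only [Function.comp_apply, Nat.succ_eq_add_one]
      simp only [pvChunkA]
      have hdrop : l.reverse.drop (4 * (i + 1)) = (l.take (l.length - 4)).reverse.drop (4 * i) := by
        rw [List.drop_reverse, List.drop_reverse, hl', List.take_take]
        congr 2
        omega
      rw [hdrop]
      refine if_congr ?_ rfl rfl
      constructor <;> rintro ⟨h, hp⟩ <;> exact ⟨by push_cast at h ⊢; omega, hp⟩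
    have hhead : pvChunkA l.reverse (pvSizeN (l.length - 4) + 1) 0
        = PySem.Chars.zfill (PySem.Int.toChars (pvVal (l.drop (l.length - 4)))) 7 := by
      simp only [pvChunkA]
      simp only [Nat.mul_zero, List.drop_zero]
      rw [List.take_reverse, List.reverse_reverse]
      have h4 : l.length - (4:Nat) = l.length - 4 := rfl
      have hcond : ((((0:Nat) : Int) < ((pvSizeN (l.length - 4) + 1 : Nat) : Int) - 1) ∧
            (PySem.Int.toChars (pvDecode62 (l.drop (l.length - 4)))).length < 7)
          ↔ (PySem.Int.toChars (pvDecode62 (l.drop (l.length - 4)))).length < 7 := by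
        constructor
        · rintro ⟨-, hp⟩; exact hp
        · intro hp; exact ⟨by push_cast; omega, hp⟩
      rw [if_congr hcond rfl rfl, pvPadEqZfill _ (pvDecNonneg _)]
      rw [pvValEq _ (fun c hc => hmem c (List.mem_of_mem_drop hc))]
    have hR : pvRender l = pvRender (l.take (l.length - 4)) ++
        PySem.Chars.zfill (PySem.Int.toChars (pvVal (l.drop (l.length - 4)))) 7 := by
      rw [pvRender]; rw [if_neg (by omega)]
    rw [htail, hIH, hhead, hR]
    simp

theorem pvMain (l : List Char) (hl : l ≠ []) (hmem : ∀ c ∈ l, c ∈ pvAlphabet) :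
    PySem.Chars.join [] (((List.range (pvSizeN l.length)).map (pvChunkA l.reverse (pvSizeN l.length))).reverse)
      = pvRender l :=
  pvMainAux l.length l rfl hl hmem

-- ===== VERDICT (by name: the statement is the Claim_ definition above) =====
theorem mid_to_id_spec : Claim_equal_mid_to_id := by
  intro mid _ hpre
  unfold Spec_mid_to_id
  have hmem : ∀ c ∈ mid.toList, c ∈ pvAlphabet := by
    intro c hc
    have := List.all_eq_true.mp hpre.2 c hc
    simpa using this
  rw [pvPortAEq, mid_to_id_alt, pvMain mid.toList hpre.1 hmem]
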